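-- pv_equiv track=rewrite | github.com/carlosalvro/InterfazMetztliKan | json_v3.py | SEPARAR_MENSAJE_JSON
-- ===== SOURCE A (Python) =====
-- def SEPARAR_MENSAJE_JSON(cadena):
--   mensajeNombres = []
--   mensajeValores = []
--   indices = []
--
--   numeroComillasDobles = cadena.count('"',0,len(cadena))
--
--   indices.append(cadena.find('"', 0, len(cadena)))
--   for i in range(1,numeroComillasDobles):
--     indices.append(cadena.find('"', indices[len(indices)-1]+1, len(cadena)))
--
--   for i in range(int(numeroComillasDobles/4)):
--     mensajeNombres.append(cadena[indices[(i*4)+0]+1:indices[(i*4)+1]])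
--     mensajeValores.append(cadena[indices[(i*4)+2]+1:indices[(i*4)+3]])
--
--   return mensajeNombres, mensajeValores
-- ===== SOURCE B (Python) =====
-- def SEPARAR_MENSAJE_JSON(cadena):
--   partes = cadena.split('"')
--   n = (len(partes) - 1) // 4
--   nombres = [partes[4 * i + 1] for i in range(n)]
--   valores = [partes[4 * i + 3] for i in range(n)]
--   return nombres, valores
-- ===== Notes on version B (the rewrite author's own statement) =====
-- stated objective: idiomatic
-- what changed: Replaces the list of quote positions built by repeated str.find with manual slicing between them by a single str.split on the double-quote character followed by a strided pickup of the segments at offsets 4i+1 and 4i+3.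
import Mathlib
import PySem

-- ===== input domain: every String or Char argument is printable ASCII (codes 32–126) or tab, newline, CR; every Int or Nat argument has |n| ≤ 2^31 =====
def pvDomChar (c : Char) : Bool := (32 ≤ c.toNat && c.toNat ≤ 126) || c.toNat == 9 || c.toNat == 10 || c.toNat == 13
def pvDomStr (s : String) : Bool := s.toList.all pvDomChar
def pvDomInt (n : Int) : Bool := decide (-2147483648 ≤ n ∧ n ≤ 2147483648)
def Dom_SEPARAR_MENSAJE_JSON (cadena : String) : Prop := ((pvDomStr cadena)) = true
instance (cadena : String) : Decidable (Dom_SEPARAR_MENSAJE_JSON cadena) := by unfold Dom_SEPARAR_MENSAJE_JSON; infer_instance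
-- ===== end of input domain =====

-- B replaces A's repeated str.find position bookkeeping with one split('"') and a strided pickup of segments 4i+1 / 4i+3 (objective: idiomatic).

-- ===== PORT A =====
def SEPARAR_MENSAJE_JSON (cadena : String) : List String × List String :=
  -- numeroComillasDobles = cadena.count('"', 0, len(cadena))  -- bounds 0..len(cadena) cover the whole string
  let numeroComillasDobles : Int := (PySem.Str.count cadena "\"" : Int)
  -- indices.append(cadena.find('"', 0, len(cadena)))
  let indices : List Int := [PySem.Str.findFrom cadena "\"" 0 (some (PySem.Str.len cadena))]
  -- for i in range(1, numeroComillasDobles): indices.append(cadena.find('"', indices[len(indices)-1]+1, len(cadena)))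
  let indices : List Int := (PySem.List.pyRange 1 numeroComillasDobles 1).foldl
    (fun ind _ => ind ++ [PySem.Str.findFrom cadena "\""
        (((PySem.List.pyGet? ind ((ind.length : Int) - 1)).getD 0) + 1)  -- indices[len(indices)-1]: ind is nonempty, pyGet? always hits
        (some (PySem.Str.len cadena))]) indices
  -- for i in range(int(numeroComillasDobles/4)): append the two slices; int(x/4) on this nonnegative int is floor division
  (PySem.List.pyRange 0 (PySem.Int.floordiv numeroComillasDobles 4) 1).foldl
    (fun nv i =>
      (nv.1 ++ [PySem.Str.slice cadena (some (((PySem.List.pyGet? indices (i*4+0)).getD 0) + 1))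
                                       (some ((PySem.List.pyGet? indices (i*4+1)).getD 0))],
       nv.2 ++ [PySem.Str.slice cadena (some (((PySem.List.pyGet? indices (i*4+2)).getD 0) + 1))
                                       (some ((PySem.List.pyGet? indices (i*4+3)).getD 0))]))
    ([], [])

-- ===== PORT B =====
def SEPARAR_MENSAJE_JSON_alt (cadena : String) : List String × List String :=
  -- partes = cadena.split('"')  -- separator is nonempty, so split? is always some
  let partes : List String := (PySem.Str.split? cadena "\"").getD []
  -- n = (len(partes) - 1) // 4  -- len(partes) ≥ 1, all quantities nonnegative
  let n : Nat := (partes.length - 1) / 4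
  -- nombres = [partes[4*i+1] for i in range(n)]; valores = [partes[4*i+3] for i in range(n)]  -- indices are in range, pyGet? always hits
  ((List.range n).map (fun i => (PySem.List.pyGet? partes ((4*i+1 : Nat) : Int)).getD ""),
   (List.range n).map (fun i => (PySem.List.pyGet? partes ((4*i+3 : Nat) : Int)).getD ""))

-- ===== PRECONDITION & SPEC =====
def Spec_SEPARAR_MENSAJE_JSON (cadena : String) (out : List String × List String) : Prop := out = SEPARAR_MENSAJE_JSON_alt cadena
instance (cadena : String) (out : List String × List String) : Decidable (Spec_SEPARAR_MENSAJE_JSON cadena out) := by unfold Spec_SEPARAR_MENSAJE_JSON; infer_instance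

-- ===== CLAIM (what is proved, stated in full; the proofs are below) =====
def Claim_equal_SEPARAR_MENSAJE_JSON : Prop := ∀ (cadena : String), Dom_SEPARAR_MENSAJE_JSON cadena → Spec_SEPARAR_MENSAJE_JSON cadena (SEPARAR_MENSAJE_JSON cadena)

-- ===== LEMMAS AND PROOFS =====

-- `msp cs` = the segments of `cs` between double quotes (what Python's split('"') returns, char level)
def msp : List Char → List (List Char)
  | [] => [[]]
  | c :: t => if c = '\"' then [] :: msp t else (msp t).modifyHead (fun h => c :: h)

-- inverse of msp: glue the parts back with a quote between consecutive parts
def joinq : List (List Char) → List Char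
  | [] => []
  | [a] => a
  | a :: b :: r => a ++ '\"' :: joinq (b :: r)

-- position of the (j+1)-th quote in the string whose parts are P
def off (P : List (List Char)) (j : Nat) : Nat := ((P.take (j+1)).map List.length).sum + j

-- the iterated find of port A: pfun cs j = A's indices[j]
def pfun (cs : List Char) : Nat → Int
  | 0 => PySem.Chars.find cs ['\"']
  | j+1 => PySem.Chars.findFrom cs ['\"'] (pfun cs j + 1) none

theorem isPrefixOf_quote (c : Char) (t : List Char) :
    ['\"'].isPrefixOf (c :: t) = true ↔ c = '\"' := by
  have h0 : List.isPrefixOf ([] : List Char) t = true := by cases t <;> rfl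
  show ('\"' == c && List.isPrefixOf [] t) = true ↔ c = '\"'
  rw [h0, Bool.and_true, beq_iff_eq, eq_comm]

theorem msp_ne_nil (cs : List Char) : msp cs ≠ [] := by
  induction cs with
  | nil => simp [msp]
  | cons c t ih =>
    simp only [msp]
    split
    · simp
    · cases h : msp t with
      | nil => exact absurd h ih
      | cons a r => simp [List.modifyHead]

theorem msp_length (cs : List Char) : (msp cs).length = cs.count '\"' + 1 := by
  induction cs with
  | nil => simp [msp]
  | cons c t ih =>
    by_cases hc : c = '\"'
    · subst hc
      have h1 : msp ('\"' :: t) = [] :: msp t := by simp [msp]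
      rw [h1, List.length_cons, ih, List.count_cons]
      simp
    · have h1 : msp (c :: t) = (msp t).modifyHead (fun h => c :: h) := by simp [msp, hc]
      rw [h1, List.length_modifyHead, ih, List.count_cons]
      simp [hc]

theorem msp_decomp (cs : List Char) (h : 2 ≤ (msp cs).length) :
    ∃ a cs', cs = a ++ '\"' :: cs' ∧ '\"' ∉ a ∧ msp cs = a :: msp cs' := by
  induction cs with
  | nil => simp [msp] at h
  | cons c t ih =>
    by_cases hc : c = '\"'
    · exact ⟨[], t, by simp [hc], by simp, by simp [msp, hc]⟩
    · have hlen : 2 ≤ (msp t).length := by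
        have := h
        simp only [msp, if_neg hc] at this
        cases hm : msp t with
        | nil => exact absurd hm (msp_ne_nil t)
        | cons a r => rw [hm] at this; simpa using this
      obtain ⟨a, cs', rfl, ha, hm⟩ := ih hlen
      refine ⟨c :: a, cs', by simp, by simp [ha]; exact fun hq => hc hq.symm, ?_⟩
      simp [msp, hc, hm, List.modifyHead]

theorem joinq_cons (c : Char) (a : List Char) (r : List (List Char)) :
    joinq ((c :: a) :: r) = c :: joinq (a :: r) := by
  cases r <;> simp [joinq]

theorem joinq_msp (cs : List Char) : joinq (msp cs) = cs := by
  induction cs with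
  | nil => simp [msp, joinq]
  | cons c t ih =>
    by_cases hc : c = '\"'
    · subst hc
      have h1 : msp ('\"' :: t) = [] :: msp t := by simp [msp]
      rw [h1]
      cases hm : msp t with
      | nil => exact absurd hm (msp_ne_nil t)
      | cons a r =>
        have h2 : joinq ([] :: a :: r) = '\"' :: joinq (a :: r) := by simp [joinq]
        rw [h2, ← hm, ih]
    · have h1 : msp (c :: t) = (msp t).modifyHead (fun h => c :: h) := by simp [msp, hc]
      rw [h1]
      cases hm : msp t with
      | nil => exact absurd hm (msp_ne_nil t)
      | cons a r =>
        simp only [List.modifyHead]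
        rw [joinq_cons, ← hm, ih]

theorem joinq_length (P : List (List Char)) (h : P ≠ []) :
    (joinq P).length = (P.map List.length).sum + (P.length - 1) := by
  induction P with
  | nil => simp at h
  | cons a r ih =>
    cases r with
    | nil => simp [joinq]
    | cons b r' =>
      simp only [joinq, List.length_append, List.length_cons]
      rw [List.length_cons] at *
      have := ih (by simp)
      simp only [List.map_cons, List.sum_cons] at *
      omega

theorem off_zero (a : List Char) (P : List (List Char)) : off (a :: P) 0 = a.length := by
  simp [off]

theorem off_succ (a : List Char) (P : List (List Char)) (j : Nat) :
    off (a :: P) (j+1) = a.length + 1 + off P j := by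
  simp only [off, List.take_succ_cons, List.map_cons, List.sum_cons]
  omega

theorem off_lt (P : List (List Char)) (j : Nat) (h : j + 1 < P.length) :
    off P j < (joinq P).length := by
  have hne : P ≠ [] := by intro hn; simp [hn] at h
  rw [joinq_length P hne]
  have hsplit : ((P.take (j+1)).map List.length).sum ≤ (P.map List.length).sum := by
    conv_rhs => rw [← List.take_append_drop (j+1) P]
    rw [List.map_append, List.sum_append]
    omega
  simp only [off]
  omega

theorem find_go_append (a r : List Char) (k : Nat) (h : '\"' ∉ a) :
    PySem.Chars.find.go ['\"'] (a ++ '\"' :: r) k = (k : Int) + a.length := by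
  induction a generalizing k with
  | nil =>
    simp only [List.nil_append]
    rw [PySem.Chars.find.go, if_pos ((isPrefixOf_quote _ _).mpr rfl)]
    simp
  | cons c t ih =>
    have hcq : ¬ c = '\"' := fun hq => h (by simp [hq])
    rw [List.cons_append, PySem.Chars.find.go,
        if_neg (fun hp => hcq ((isPrefixOf_quote _ _).mp hp))]
    rw [ih (k+1) (fun hm => h (List.mem_cons_of_mem _ hm))]
    push_cast [List.length_cons]; ring

theorem find_append_cons (a r : List Char) (h : '\"' ∉ a) :
    PySem.Chars.find (a ++ '\"' :: r) ['\"'] = (a.length : Int) := by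
  unfold PySem.Chars.find
  rw [find_go_append a r 0 h]; ring

theorem count_go_eq (l : List Char) (fuel acc : Nat) (h : l.length ≤ fuel) :
    PySem.Chars.count.go ['\"'] fuel l acc = acc + l.count '\"' := by
  induction l generalizing fuel acc with
  | nil => cases fuel <;> simp [PySem.Chars.count.go]
  | cons c t ih =>
    cases fuel with
    | zero => simp at h
    | succ f =>
      by_cases hc : c = '\"'
      · subst hc
        rw [PySem.Chars.count.go, if_pos ((isPrefixOf_quote _ _).mpr rfl)]
        simp only [List.length_singleton, List.drop_one, List.tail_cons]
        rw [ih f (acc+1) (by simpa using h)]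
        simp [List.count_cons]
        omega
      · rw [PySem.Chars.count.go, if_neg (fun hp => hc ((isPrefixOf_quote _ _).mp hp))]
        rw [ih f acc (by simpa using h)]
        have : (c == '\"') = false := by simpa using hc
        simp [List.count_cons, this]

theorem count_eq_count (cs : List Char) : PySem.Chars.count cs ['\"'] = cs.count '\"' := by
  unfold PySem.Chars.count
  rw [if_neg (by simp)]
  simpa using count_go_eq cs cs.length 0 le_rfl

theorem splitOn_go_eq (l : List Char) (fuel : Nat) (cur : List Char) (acc : List (List Char))
    (h : l.length ≤ fuel) :
    PySem.Chars.splitOn.go ['\"'] fuel l cur acc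
      = acc.reverse ++ (msp l).modifyHead (fun h => cur.reverse ++ h) := by
  induction l generalizing fuel cur acc with
  | nil => cases fuel <;> simp [PySem.Chars.splitOn.go, msp, List.modifyHead]
  | cons c t ih =>
    cases fuel with
    | zero => simp at h
    | succ f =>
      by_cases hc : c = '\"'
      · subst hc
        rw [PySem.Chars.splitOn.go, if_pos ((isPrefixOf_quote _ _).mpr rfl)]
        simp only [List.length_singleton, List.drop_one, List.tail_cons]
        rw [ih f [] (cur.reverse :: acc) (by simpa using h)]
        cases hm : msp t with
        | nil => exact absurd hm (msp_ne_nil t)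
        | cons a r => simp [msp, hm, List.modifyHead]
      · rw [PySem.Chars.splitOn.go, if_neg (fun hp => hc ((isPrefixOf_quote _ _).mp hp))]
        rw [ih f (c :: cur) acc (by simpa using h)]
        cases hm : msp t with
        | nil => exact absurd hm (msp_ne_nil t)
        | cons a r => simp [msp, hc, hm, List.modifyHead]

theorem splitOn_eq_msp (cs : List Char) : PySem.Chars.splitOn cs ['\"'] = msp cs := by
  unfold PySem.Chars.splitOn
  rw [splitOn_go_eq cs (cs.length + 1) [] [] (by omega)]
  cases hm : msp cs with
  | nil => exact absurd hm (msp_ne_nil cs)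
  | cons a r => simp [List.modifyHead]

theorem findFrom_end_len (s sub : List Char) (k : Int) :
    PySem.Chars.findFrom s sub k (some (s.length : Int)) = PySem.Chars.findFrom s sub k none := by
  unfold PySem.Chars.findFrom
  have h1 : ¬ ((s.length : Int) < 0) := by omega
  simp [h1, Int.toNat_natCast]

theorem drop_head_part (a cs' : List Char) (s : Nat) :
    List.drop (a.length + 1 + s) (a ++ '\"' :: cs') = List.drop s cs' := by
  have h2 : a ++ '\"' :: cs' = (a ++ ['\"']) ++ cs' := by simp
  rw [h2]
  have h4 : List.drop (a.length + 1 + s) ((a ++ ['\"']) ++ cs')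
      = List.drop s (List.drop (a ++ ['\"']).length ((a ++ ['\"']) ++ cs')) := by
    rw [List.drop_drop]
    congr 1
    simp [List.length_append]
  rw [h4, List.drop_left]

theorem findFrom_shift (a cs' : List Char) (s : Nat) (ha : '\"' ∉ a) (hs : s ≤ cs'.length) :
    PySem.Chars.findFrom (a ++ '\"' :: cs') ['\"'] ((a.length : Int) + 1 + s) none
      = (if PySem.Chars.findFrom cs' ['\"'] (s : Int) none = -1 then -1
         else (a.length : Int) + 1 + PySem.Chars.findFrom cs' ['\"'] (s : Int) none) := by
  have hlen : (a ++ '\"' :: cs').length = a.length + 1 + cs'.length := by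
    simp [List.length_append]; omega
  have hk : a.length + 1 + s ≤ (a ++ '\"' :: cs').length := by omega
  have hcast : (a.length : Int) + 1 + (s : Int) = ((a.length + 1 + s : Nat) : Int) := by
    push_cast; ring
  rw [hcast, PySem.Chars.findFrom_natCast _ _ _ hk, PySem.Chars.findFrom_natCast _ _ _ hs]
  rw [drop_head_part a cs' s]
  by_cases h : PySem.Chars.find (List.drop s cs') ['\"'] = -1
  · simp [h]
  · have hge : 0 ≤ PySem.Chars.find (List.drop s cs') ['\"'] := by
      have := PySem.Chars.neg_one_le_find (List.drop s cs') ['\"']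
      omega
    simp only [if_neg h]
    rw [if_neg (by omega)]
    push_cast; ring

theorem pfun_eq : ∀ (j : Nat) (cs : List Char), j + 1 < (msp cs).length →
    pfun cs j = (off (msp cs) j : Int) := by
  intro j
  induction j using Nat.strong_induction_on with
  | _ j IH =>
    intro cs hj
    obtain ⟨a, cs', rfl, ha, hm⟩ := msp_decomp cs (by omega)
    have hlen' : (msp (a ++ '\"' :: cs')).length = (msp cs').length + 1 := by
      rw [hm]; simp
    cases j with
    | zero =>
      rw [hm, off_zero]
      exact find_append_cons a cs' ha
    | succ j' =>
      have hcs'len : ∀ (t : Nat), t < j' + 1 → t + 1 < (msp cs').length →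
          pfun cs' t = (off (msp cs') t : Int) := fun t htj ht =>
        IH t (by omega) cs' ht
      cases j' with
      | zero =>
        have h1 : 1 < (msp cs').length := by omega
        show PySem.Chars.findFrom _ ['\"'] (pfun (a ++ '\"' :: cs') 0 + 1) none = _
        have hf0 : pfun (a ++ '\"' :: cs') 0 = (a.length : Int) :=
          find_append_cons a cs' ha
        rw [hf0]
        have hc0 : (a.length : Int) + 1 = (a.length : Int) + 1 + ((0 : Nat) : Int) := by simp
        rw [hc0, findFrom_shift a cs' 0 ha (by omega)]
        have hz : PySem.Chars.findFrom cs' ['\"'] ((0 : Nat) : Int) none = pfun cs' 0 := by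
          simp [PySem.Chars.findFrom_zero, pfun]
        rw [hz, hcs'len 0 (by omega) h1]
        rw [if_neg (by omega), hm, off_succ]
        push_cast; ring
      | succ t =>
        have hT : t + 2 < (msp cs').length := by omega
        have hIH1 : pfun (a ++ '\"' :: cs') (t+1) = (off (msp (a ++ '\"' :: cs')) (t+1) : Int) :=
          IH (t+1) (by omega) _ (by omega)
        show PySem.Chars.findFrom _ ['\"'] (pfun (a ++ '\"' :: cs') (t+1) + 1) none = _
        rw [hIH1, hm, off_succ]
        have hofflt : off (msp cs') t < cs'.length := by
          have := off_lt (msp cs') t (by omega)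
          rwa [joinq_msp] at this
        have hc1 : ((a.length + 1 + off (msp cs') t : Nat) : Int) + 1
            = (a.length : Int) + 1 + ((off (msp cs') t + 1 : Nat) : Int) := by push_cast; ring
        rw [hc1, findFrom_shift a cs' (off (msp cs') t + 1) ha (by omega)]
        have hstep : PySem.Chars.findFrom cs' ['\"'] ((off (msp cs') t + 1 : Nat) : Int) none
            = pfun cs' (t+1) := by
          show _ = PySem.Chars.findFrom cs' ['\"'] (pfun cs' t + 1) none
          rw [hcs'len t (by omega) (by omega)]
          push_cast; ring_nf
        rw [hstep, hcs'len (t+1) (by omega) hT]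
        rw [if_neg (by omega), off_succ]
        push_cast; ring

theorem slice_part : ∀ (j : Nat) (cs : List Char), j + 2 ≤ (msp cs).length →
    PySem.Chars.slice cs (some ((off (msp cs) j : Int) + 1)) (some (off (msp cs) (j+1) : Int))
      = (msp cs).getD (j+1) [] := by
  intro j
  induction j with
  | zero =>
    intro cs hj
    obtain ⟨a, cs', rfl, ha, hm⟩ := msp_decomp cs (by omega)
    rw [hm, off_zero, off_succ]
    cases hb : msp cs' with
    | nil => exact absurd hb (msp_ne_nil cs')
    | cons b r =>
      rw [off_zero]
      have hc : (a.length : Int) + 1 = ((a.length + 1 : Nat) : Int) := by push_cast; ring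
      rw [hc]
      unfold PySem.Chars.slice
      rw [PySem.List.slice_natCast]
      have hd : List.drop (a.length + 1) (a ++ '\"' :: cs') = cs' := by
        have := drop_head_part a cs' 0
        simpa using this
      rw [hd]
      have hcs' : cs' = joinq (b :: r) := by rw [← hb, joinq_msp]
      have htake : a.length + 1 + b.length - (a.length + 1) = b.length := by omega
      rw [htake, hcs']
      cases r with
      | nil => simp [joinq]
      | cons c r' =>
        show List.take b.length (joinq (b :: c :: r')) = b
        have : joinq (b :: c :: r') = b ++ '\"' :: joinq (c :: r') := by simp [joinq]
        rw [this, List.take_left]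
  | succ j ih =>
    intro cs hj
    obtain ⟨a, cs', rfl, ha, hm⟩ := msp_decomp cs (by omega)
    rw [hm, off_succ, off_succ]
    have hcond : j + 2 ≤ (msp cs').length := by
      have hl : (msp (a ++ '\"' :: cs')).length = (msp cs').length + 1 := by rw [hm]; simp
      omega
    have hIH := ih cs' hcond
    have hc3 : ((off (msp cs') j : Int) + 1) = ((off (msp cs') j + 1 : Nat) : Int) := by push_cast; ring
    rw [hc3] at hIH
    unfold PySem.Chars.slice at hIH ⊢
    rw [PySem.List.slice_natCast] at hIH
    have hc1 : ((a.length + 1 + off (msp cs') j : Nat) : Int) + 1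
        = ((a.length + 1 + (off (msp cs') j + 1) : Nat) : Int) := by push_cast; ring
    rw [hc1, PySem.List.slice_natCast]
    rw [drop_head_part a cs' (off (msp cs') j + 1)]
    have htake : a.length + 1 + off (msp cs') (j+1) - (a.length + 1 + (off (msp cs') j + 1))
        = off (msp cs') (j+1) - (off (msp cs') j + 1) := by omega
    rw [htake, hIH]
    simp

theorem ind_fold (cadena : String) (k : Nat) (hk : 1 ≤ k) :
    (PySem.List.pyRange 1 (k : Int) 1).foldl
      (fun ind _ => ind ++ [PySem.Str.findFrom cadena "\""
          (((PySem.List.pyGet? ind ((ind.length : Int) - 1)).getD 0) + 1)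
          (some (PySem.Str.len cadena))])
      [PySem.Str.findFrom cadena "\"" 0 (some (PySem.Str.len cadena))]
    = (List.range k).map (pfun cadena.toList) := by
  induction k with
  | zero => omega
  | succ n ih =>
    by_cases hn : n = 0
    · subst hn
      rw [PySem.List.pyRange_one_eq_nil (by norm_num)]
      show [PySem.Str.findFrom cadena "\"" 0 (some (PySem.Str.len cadena))] = _
      have h1 : PySem.Str.findFrom cadena "\"" 0 (some (PySem.Str.len cadena))
          = pfun cadena.toList 0 := by
        show PySem.Chars.findFrom cadena.toList ['\"'] 0 (some ((cadena.toList.length : Nat) : Int)) = _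
        rw [findFrom_end_len, PySem.Chars.findFrom_zero]
        rfl
      rw [h1]
      simp
    · have hn1 : 1 ≤ n := by omega
      have hc : ((n+1 : Nat) : Int) = (n : Int) + 1 := by push_cast; ring
      rw [hc, PySem.List.pyRange_one_succ_right (by exact_mod_cast hn1), List.foldl_append,
          ih hn1]
      simp only [List.foldl_cons, List.foldl_nil]
      have hlen : (((List.range n).map (pfun cadena.toList)).length : Int) - 1 = ((n - 1 : Nat) : Int) := by
        simp; omega
      rw [hlen, PySem.List.pyGet?_natCast]
      have hget : ((List.range n).map (pfun cadena.toList))[n-1]? = some (pfun cadena.toList (n-1)) := by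
        rw [List.getElem?_map, List.getElem?_range (by omega)]
        rfl
      rw [hget, Option.getD_some]
      have hstep : PySem.Str.findFrom cadena "\"" (pfun cadena.toList (n-1) + 1) (some (PySem.Str.len cadena))
          = pfun cadena.toList n := by
        show PySem.Chars.findFrom cadena.toList ['\"'] _ (some ((cadena.toList.length : Nat) : Int)) = _
        rw [findFrom_end_len]
        have h2 : n - 1 + 1 = n := by omega
        conv_rhs => rw [← h2]
        rfl
      rw [hstep, List.range_succ, List.map_append]
      rfl

theorem pyRange_zero_natCast (n : Nat) :
    PySem.List.pyRange 0 (n : Int) 1 = (List.range n).map (Nat.cast : Nat → Int) := by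
  induction n with
  | zero => simp [PySem.List.pyRange_one_eq_nil]
  | succ m ih =>
    have hc : ((m+1 : Nat) : Int) = (m : Int) + 1 := by push_cast; ring
    rw [hc, PySem.List.pyRange_one_succ_right (by positivity), ih, List.range_succ,
        List.map_append]
    rfl

theorem getD_map_ofList (P : List (List Char)) (n : Nat) :
    (PySem.List.pyGet? (P.map String.ofList) ((n : Nat) : Int)).getD "" = String.ofList (P.getD n []) := by
  rw [PySem.List.pyGet?_natCast, List.getElem?_map, List.getD_eq_getElem?_getD]
  cases h : P[n]? with
  | none => rfl
  | some x => rfl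

theorem floordiv_natCast4 (m : Nat) : PySem.Int.floordiv (m : Int) 4 = ((m / 4 : Nat) : Int) := by
  rw [PySem.Int.floordiv, Int.fdiv_eq_ediv]
  omega

theorem fold_pair_map {β : Type} (f g : β → String) (l : List β) :
    l.foldl (fun nv i => (nv.1 ++ [f i], nv.2 ++ [g i])) (([], []) : List String × List String)
      = (l.map f, l.map g) := by
  suffices h : ∀ acc : List String × List String,
      l.foldl (fun nv i => (nv.1 ++ [f i], nv.2 ++ [g i])) acc
        = (acc.1 ++ l.map f, acc.2 ++ l.map g) by
    simpa using h ([], [])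
  induction l with
  | nil => intro acc; simp
  | cons x t ih => intro acc; simp [ih]

theorem main_eq (cadena : String) : SEPARAR_MENSAJE_JSON cadena = SEPARAR_MENSAJE_JSON_alt cadena := by
  have hcount : PySem.Str.count cadena "\"" = cadena.toList.count '\"' := by
    show PySem.Chars.count cadena.toList ['\"'] = _
    exact count_eq_count _
  have hsplit : (PySem.Str.split? cadena "\"").getD [] = (msp cadena.toList).map String.ofList := by
    show (Option.map (fun x => List.map String.ofList x) (PySem.Chars.split? cadena.toList ['\"'])).getD [] = _
    rw [show PySem.Chars.split? cadena.toList ['\"'] = some (PySem.Chars.splitOn cadena.toList ['\"']) from by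
      unfold PySem.Chars.split?; rw [if_neg (by simp)]]
    rw [splitOn_eq_msp]
    rfl
  have hB : SEPARAR_MENSAJE_JSON_alt cadena =
      ((List.range (cadena.toList.count '\"' / 4)).map
         (fun i => String.ofList ((msp cadena.toList).getD (4*i+1) [])),
       (List.range (cadena.toList.count '\"' / 4)).map
         (fun i => String.ofList ((msp cadena.toList).getD (4*i+3) []))) := by
    simp only [SEPARAR_MENSAJE_JSON_alt]
    rw [hsplit]
    have hlen : ((msp cadena.toList).map String.ofList).length - 1 = cadena.toList.count '\"' := by
      rw [List.length_map, msp_length]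
      omega
    rw [hlen]
    refine congrArg₂ Prod.mk ?_ ?_ <;>
      exact List.map_congr_left (fun i _ => getD_map_ofList _ _)
  by_cases hn0 : cadena.toList.count '\"' / 4 = 0
  · simp only [SEPARAR_MENSAJE_JSON]
    rw [hcount, floordiv_natCast4, hn0]
    rw [PySem.List.pyRange_one_eq_nil (a := 0) (b := ((0 : Nat) : Int)) (by norm_num)]
    rw [hB]
    rw [show List.range (List.count '\"' cadena.toList / 4) = [] from by rw [hn0, List.range_zero]]
    rfl
  · have hm1 : 1 ≤ cadena.toList.count '\"' := by omega
    simp only [SEPARAR_MENSAJE_JSON]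
    rw [hcount, ind_fold cadena (cadena.toList.count '\"') hm1]
    rw [floordiv_natCast4, pyRange_zero_natCast]
    rw [fold_pair_map, List.map_map, List.map_map, hB]
    have hP : (msp cadena.toList).length = List.count '\"' cadena.toList + 1 := msp_length _
    have hel : ∀ (j : Nat), j < List.count '\"' cadena.toList →
        (PySem.List.pyGet? ((List.range (List.count '\"' cadena.toList)).map (pfun cadena.toList))
          ((j : Nat) : Int)).getD 0 = ((off (msp cadena.toList) j : Nat) : Int) := by
      intro j hj
      rw [PySem.List.pyGet?_natCast, List.getElem?_map, List.getElem?_range hj]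
      show pfun cadena.toList j = _
      exact pfun_eq j cadena.toList (by omega)
    refine congrArg₂ Prod.mk ?_ ?_
    · apply List.map_congr_left
      intro k hk
      simp only [Function.comp_apply]
      have hk4 : 4 * k + 3 < List.count '\"' cadena.toList := by
        rw [List.mem_range] at hk
        omega
      have hc0 : ((k : Int)) * 4 + 0 = ((4 * k : Nat) : Int) := by push_cast; ring
      have hc1 : ((k : Int)) * 4 + 1 = ((4 * k + 1 : Nat) : Int) := by push_cast; ring
      rw [hc0, hc1, hel (4*k) (by omega), hel (4*k+1) (by omega)]
      exact congrArg String.ofList (slice_part (4*k) cadena.toList (by omega))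
    · apply List.map_congr_left
      intro k hk
      simp only [Function.comp_apply]
      have hk4 : 4 * k + 3 < List.count '\"' cadena.toList := by
        rw [List.mem_range] at hk
        omega
      have hc2 : ((k : Int)) * 4 + 2 = ((4 * k + 2 : Nat) : Int) := by push_cast; ring
      have hc3 : ((k : Int)) * 4 + 3 = ((4 * k + 3 : Nat) : Int) := by push_cast; ring
      rw [hc2, hc3, hel (4*k+2) (by omega), hel (4*k+3) (by omega)]
      have h43 : 4 * k + 2 + 1 = 4 * k + 3 := rfl
      have := slice_part (4*k+2) cadena.toList (by omega)
      rw [h43] at this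
      exact congrArg String.ofList this

-- ===== VERDICT (by name: the statement is the Claim_ definition above) =====
theorem SEPARAR_MENSAJE_JSON_spec : Claim_equal_SEPARAR_MENSAJE_JSON := by
  intro cadena _
  exact main_eq cadena
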